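-- pv_equiv track=rewrite | github.com/akki111singh/InterviewBit-Solutions | graphs/valid-path.py | solve
-- ===== SOURCE A (Python) =====
-- def dist(p1,p2):
--     return (p1[0]-p2[0])**2 + (p1[1]-p2[1])**2
--
-- def outofbounds(x1,y1,x,y):
--     if x1>x or x1<0 or y1>y or y1<0:
--         return True
--     else:
--         return False
--
-- def dfs(x1,y1,mat,x,y):
--     mat[x1][y1] = 1
--     if outofbounds(x1,y1,x,y):
--         return False
--     if x1==x and y1==y:
--         return True
--     neighbours = [(x1-1,y1),(x1+1,y1),(x1,y1+1),(x1,y1-1),(x1-1,y1-1),(x1+1,y1+1),(x1-1,y1+1),(x1+1,y1-1)]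
--     res = False
--     for n in neighbours:
--         if outofbounds(n[0],n[1],x,y)==False and mat[n[0]][n[1]]==0:
--             res = res or dfs(n[0],n[1],mat,x,y)
--     return res
--
-- def solve(A, B, C, D, E, F):
--     mat = []
--     x = A
--     y = B
--     N = C
--     R = D
--     cx = E
--     cy = F
--     for i in range(A+1):
--         mat.append([])
--         for j in range(B+1):
--             mat[-1].append(0)
--     for c in range(N):
--         for i in range(x+1):
--             for j in range(y+1):
--                 if dist([i,j],[cx[c],cy[c]])<=R**2:
--                     mat[i][j] = -1
--     if mat[x][y]==-1:
--         return "NO"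
--     else:
--         return "YES" if dfs(0,0,mat,x,y) else "NO"
-- ===== SOURCE B (Python) =====
-- def solve(A, B, C, D, E, F):
--     # blocked cells: scan only each circle's bounding box instead of the whole grid
--     r = abs(D)
--     r2 = D * D
--     blocked = set()
--     for c in range(C):
--         x0 = E[c]
--         y0 = F[c]
--         for i in range(max(0, x0 - r), min(A, x0 + r) + 1):
--             for j in range(max(0, y0 - r), min(B, y0 + r) + 1):
--                 if (i - x0) ** 2 + (j - y0) ** 2 <= r2:
--                     blocked.add((i, j))
--     if (A, B) in blocked:
--         return "NO"
--     # iterative frontier BFS instead of recursive DFS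
--     visited = {(0, 0)}
--     frontier = [(0, 0)]
--     while frontier:
--         nxt = []
--         for (i, j) in frontier:
--             for (di, dj) in ((-1, 0), (1, 0), (0, 1), (0, -1), (-1, -1), (1, 1), (-1, 1), (1, -1)):
--                 q = (i + di, j + dj)
--                 if 0 <= q[0] <= A and 0 <= q[1] <= B and q not in visited and q not in blocked:
--                     visited.add(q)
--                     nxt.append(q)
--         frontier = nxt
--     return "YES" if (A, B) in visited else "NO"
-- ===== Notes on version B (the rewrite author's own statement) =====
-- stated objective: alternative
-- what changed: Marks obstacle cells only inside each circle's clipped bounding box (a set, not a full matrix) and replaces the recursive marking DFS with an iterative frontier BFS over a visited set.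
import Mathlib
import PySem

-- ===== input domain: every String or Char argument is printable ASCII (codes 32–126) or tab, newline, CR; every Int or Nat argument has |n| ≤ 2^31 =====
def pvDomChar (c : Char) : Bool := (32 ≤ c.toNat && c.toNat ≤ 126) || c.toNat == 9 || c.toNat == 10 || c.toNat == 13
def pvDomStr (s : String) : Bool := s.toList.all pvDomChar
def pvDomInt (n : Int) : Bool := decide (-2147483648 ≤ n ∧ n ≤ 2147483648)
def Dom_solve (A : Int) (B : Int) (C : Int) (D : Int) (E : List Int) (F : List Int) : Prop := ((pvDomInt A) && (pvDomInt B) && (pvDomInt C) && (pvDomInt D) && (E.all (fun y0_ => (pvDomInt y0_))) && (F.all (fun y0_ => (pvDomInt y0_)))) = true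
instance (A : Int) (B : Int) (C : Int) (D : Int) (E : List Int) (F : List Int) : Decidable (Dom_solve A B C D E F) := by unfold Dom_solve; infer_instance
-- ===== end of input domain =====

-- B replaces A's whole-grid obstacle marking by per-circle clipped bounding boxes and A's
-- recursive marking DFS by an iterative frontier BFS over a visited set.

-- ===== PORT A =====
def distA (p1 p2 : Int × Int) : Int := (p1.1 - p2.1)^2 + (p1.2 - p2.2)^2

def outofboundsA (x1 y1 x y : Int) : Bool :=
  decide (x1 > x) || decide (x1 < 0) || decide (y1 > y) || decide (y1 < 0)

-- mat[i][j] read/write; exact (PySem) on the in-range indices, which are the only executed ones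
-- (every access in A is guarded by outofbounds / loop ranges).
def mgetA (m : List (List Int)) (i j : Int) : Int :=
  PySem.List.pyGetD (PySem.List.pyGetD m i []) j 0

def msetA (m : List (List Int)) (i j v : Int) : List (List Int) :=
  PySem.List.pySetD m i (PySem.List.pySetD (PySem.List.pyGetD m i []) j v)

mutual
  -- fuel only makes the recursion total; A's solve passes enough fuel (proved below)
  def dfsA (x y : Int) (fuel : Nat) (x1 y1 : Int) (mat : List (List Int)) :
      Bool × List (List Int) :=
    match fuel with
    | 0 => (false, mat)
    | Nat.succ f =>
      let mat1 := msetA mat x1 y1 1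
      if outofboundsA x1 y1 x y then (false, mat1)
      else if x1 == x && y1 == y then (true, mat1)
      else
        dfsLoopA x y f
          [(x1-1,y1),(x1+1,y1),(x1,y1+1),(x1,y1-1),(x1-1,y1-1),(x1+1,y1+1),(x1-1,y1+1),(x1+1,y1-1)]
          (false, mat1)
  termination_by (fuel, 0)

  -- the 'for n in neighbours' loop of A's dfs ('res = res or dfs(...)' short-circuits)
  def dfsLoopA (x y : Int) (fuel : Nat) (ns : List (Int × Int)) (acc : Bool × List (List Int)) :
      Bool × List (List Int) :=
    match ns with
    | [] => acc
    | n :: ns' =>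
      let acc' :=
        if (outofboundsA n.1 n.2 x y == false) && (mgetA acc.2 n.1 n.2 == 0) then
          (if acc.1 then acc else dfsA x y fuel n.1 n.2 acc.2)
        else acc
      dfsLoopA x y fuel ns' acc'
  termination_by (fuel, ns.length + 1)
end

def solve (A : Int) (B : Int) (C : Int) (D : Int) (E : List Int) (F : List Int) : String :=
  let mat : List (List Int) :=
    (PySem.List.pyRange 0 (A+1) 1).foldl
      (fun m _ => m ++ [(PySem.List.pyRange 0 (B+1) 1).foldl (fun r _ => r ++ [(0 : Int)]) []]) []
  let mat :=
    (PySem.List.pyRange 0 C 1).foldl (fun m c =>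
      (PySem.List.pyRange 0 (A+1) 1).foldl (fun m i =>
        (PySem.List.pyRange 0 (B+1) 1).foldl (fun m j =>
          if distA (i, j) (PySem.List.pyGetD E c 0, PySem.List.pyGetD F c 0) ≤ D^2 then
            msetA m i j (-1)
          else m) m) m) mat
  if mgetA mat A B == -1 then "NO"
  else if (dfsA A B (((A+1)*(B+1)).toNat + 2) 0 0 mat).1 then "YES" else "NO"

-- ===== PORT B =====
def dirsB : List (Int × Int) := [(-1,0),(1,0),(0,1),(0,-1),(-1,-1),(1,1),(-1,1),(1,-1)]

-- the 'while frontier' loop of Source B; fuel only makes it total (enough fuel is passed, proved below)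
def bfsB (A B : Int) (blocked : PySem.Set (Int × Int)) (fuel : Nat)
    (visited : PySem.Set (Int × Int)) (frontier : List (Int × Int)) : PySem.Set (Int × Int) :=
  match fuel with
  | 0 => visited
  | Nat.succ f =>
    if frontier.isEmpty then visited
    else
      let st := frontier.foldl (fun (st : PySem.Set (Int × Int) × List (Int × Int)) p =>
        dirsB.foldl (fun st d =>
          let q := (p.1 + d.1, p.2 + d.2)
          if decide (0 ≤ q.1) && decide (q.1 ≤ A) && decide (0 ≤ q.2) && decide (q.2 ≤ B)
              && !(PySem.Set.contains st.1 q) && !(PySem.Set.contains blocked q) then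
            (PySem.Set.add st.1 q, st.2 ++ [q])
          else st) st) (visited, ([] : List (Int × Int)))
      bfsB A B blocked f st.1 st.2

def solve_alt (A : Int) (B : Int) (C : Int) (D : Int) (E : List Int) (F : List Int) : String :=
  let r : Int := |D|
  let r2 : Int := D * D
  let blocked : PySem.Set (Int × Int) :=
    (PySem.List.pyRange 0 C 1).foldl (fun bl c =>
      let x0 := PySem.List.pyGetD E c 0
      let y0 := PySem.List.pyGetD F c 0
      (PySem.List.pyRange (max 0 (x0 - r)) (min A (x0 + r) + 1) 1).foldl (fun bl i =>
        (PySem.List.pyRange (max 0 (y0 - r)) (min B (y0 + r) + 1) 1).foldl (fun bl j =>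
          if (i - x0)^2 + (j - y0)^2 ≤ r2 then PySem.Set.add bl (i, j) else bl) bl) bl)
      PySem.Set.empty
  if PySem.Set.contains blocked (A, B) then "NO"
  else
    let visited := bfsB A B blocked (((A+1)*(B+1)).toNat + 2)
      (PySem.Set.ofList [((0:Int), (0:Int))]) [((0:Int), (0:Int))]
    if PySem.Set.contains visited (A, B) then "YES" else "NO"

-- ===== PRECONDITION & SPEC =====
-- Pre_ excludes exactly the inputs where A raises: a negative grid side (IndexError on mat[x][y])
-- and more circles than listed centres (IndexError on E[c]/F[c]).
def Pre_solve (A : Int) (B : Int) (C : Int) (D : Int) (E : List Int) (F : List Int) : Prop :=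
  0 ≤ A ∧ 0 ≤ B ∧ (C ≤ 0 ∨ (C ≤ (E.length : Int) ∧ C ≤ (F.length : Int)))
instance (A : Int) (B : Int) (C : Int) (D : Int) (E : List Int) (F : List Int) : Decidable (Pre_solve A B C D E F) := by unfold Pre_solve; infer_instance

def pvWitness_solve : Int × Int × Int × Int × List Int × List Int := (2, 2, 1, 1, [1], [1])

def Spec_solve (A : Int) (B : Int) (C : Int) (D : Int) (E : List Int) (F : List Int) (out : String) : Prop := out = solve_alt A B C D E F
instance (A : Int) (B : Int) (C : Int) (D : Int) (E : List Int) (F : List Int) (out : String) : Decidable (Spec_solve A B C D E F out) := by unfold Spec_solve; infer_instance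

-- ===== CLAIM (what is proved, stated in full; the proofs are below) =====
def Claim_equal_solve : Prop := ∀ (A : Int) (B : Int) (C : Int) (D : Int) (E : List Int) (F : List Int), Dom_solve A B C D E F → Pre_solve A B C D E F → Spec_solve A B C D E F (solve A B C D E F)

-- ===== LEMMAS AND PROOFS =====

-- cells, bounds, the shared step relation
def InB (x y : Int) (p : Int × Int) : Prop := 0 ≤ p.1 ∧ p.1 ≤ x ∧ 0 ≤ p.2 ∧ p.2 ≤ y

def nbrsOf (p : Int × Int) : List (Int × Int) :=
  [(p.1-1,p.2),(p.1+1,p.2),(p.1,p.2+1),(p.1,p.2-1),(p.1-1,p.2-1),(p.1+1,p.2+1),(p.1-1,p.2+1),(p.1+1,p.2-1)]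

def StepRel (x y : Int) (free : Int × Int → Prop) (p q : Int × Int) : Prop :=
  q ∈ nbrsOf p ∧ InB x y q ∧ free q

def cellsL (x y : Int) : List (Int × Int) :=
  (PySem.List.pyRange 0 (x+1) 1).flatMap fun i =>
    (PySem.List.pyRange 0 (y+1) 1).map fun j => (i, j)

def atM (m : List (List Int)) (p : Int × Int) : Int := mgetA m p.1 p.2

def ShapeM (x y : Int) (m : List (List Int)) : Prop :=
  m.length = (x+1).toNat ∧ ∀ r ∈ m, r.length = (y+1).toNat

def ZerosM (x y : Int) (m : List (List Int)) : Nat :=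
  (cellsL x y).countP fun p => atM m p == 0

def DeltaM (x y : Int) (a b : List (List Int)) : Prop :=
  ∀ p, InB x y p → atM b p = atM a p ∨ (atM a p = 0 ∧ atM b p = 1)

def Inv1 (x y : Int) (m0 m : List (List Int)) : Prop :=
  ∀ p, InB x y p → atM m p = 1 →
    atM m0 p = 1 ∨ ∀ q ∈ nbrsOf p, InB x y q → atM m q ≠ 0

abbrev BlkP (C D : Int) (E F : List Int) (p : Int × Int) : Prop :=
  ∃ c ∈ PySem.List.pyRange 0 C 1,
    (p.1 - PySem.List.pyGetD E c 0)^2 + (p.2 - PySem.List.pyGetD F c 0)^2 ≤ D^2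

lemma mem_cellsL {x y : Int} {p : Int × Int} : p ∈ cellsL x y ↔ InB x y p := by
  obtain ⟨p1, p2⟩ := p
  simp only [cellsL, List.mem_flatMap, List.mem_map, PySem.List.mem_pyRange_one, InB,
    Prod.mk.injEq]
  constructor
  · rintro ⟨i, ⟨h1, h2⟩, j, ⟨h3, h4⟩, rfl, rfl⟩
    exact ⟨h1, by omega, h3, by omega⟩
  · rintro ⟨h1, h2, h3, h4⟩
    exact ⟨p1, ⟨h1, by omega⟩, p2, ⟨h3, by omega⟩, rfl, rfl⟩

lemma length_cellsL {x y : Int} (hx : 0 ≤ x) (hy : 0 ≤ y) :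
    (cellsL x y).length = ((x+1)*(y+1)).toNat := by
  have h : ((x+1)*(y+1) : Int) = ((x+1).toNat * (y+1).toNat : Nat) := by
    push_cast [Int.toNat_of_nonneg (by omega : (0:Int) ≤ x+1),
      Int.toNat_of_nonneg (by omega : (0:Int) ≤ y+1)]
    ring
  rw [h, Int.toNat_natCast]
  simp [cellsL, List.length_flatMap, PySem.List.length_pyRange_one,
    List.map_const', List.sum_replicate, smul_eq_mul]

lemma shape_mset {x y : Int} {m : List (List Int)} {s : Int × Int} (v : Int)
    (hm : ShapeM x y m) (hs : InB x y s) : ShapeM x y (msetA m s.1 s.2 v) := by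
  obtain ⟨hm1, hm2⟩ := hm
  obtain ⟨hs1, hs2, hs3, hs4⟩ := hs
  have hl1 : s.1 < (m.length : Int) := by omega
  rw [msetA, PySem.List.pyGetD_eq_getElem m ([] : List Int) hs1 hl1,
    PySem.List.pySetD_of_nonneg _ _ hs3, PySem.List.pySetD_of_nonneg _ _ hs1]
  refine ⟨by simpa using hm1, ?_⟩
  intro r hr
  rcases List.mem_or_eq_of_mem_set hr with h | h
  · exact hm2 r h
  · subst h
    rw [List.length_set]
    exact hm2 _ (List.getElem_mem _)

lemma atM_mset {x y : Int} {m : List (List Int)} {s p : Int × Int} (v : Int)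
    (hm : ShapeM x y m) (hs : InB x y s) (hp : InB x y p) :
    atM (msetA m s.1 s.2 v) p = if p = s then v else atM m p := by
  obtain ⟨hm1, hm2⟩ := hm
  obtain ⟨hs1, hs2, hs3, hs4⟩ := hs
  obtain ⟨hp1, hp2, hp3, hp4⟩ := hp
  have hls : s.1 < (m.length : Int) := by omega
  have hlp : p.1 < (m.length : Int) := by omega
  have hrowlen : ∀ r ∈ m, r.length = (y+1).toNat := hm2
  rw [msetA, PySem.List.pyGetD_eq_getElem m ([] : List Int) hs1 hls,
    PySem.List.pySetD_of_nonneg _ _ hs3, PySem.List.pySetD_of_nonneg _ _ hs1]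
  have hps : p.1.toNat < (m.set s.1.toNat (m[s.1.toNat].set s.2.toNat v)).length := by
    rw [List.length_set]; omega
  rw [atM, mgetA,
    PySem.List.pyGetD_eq_getElem _ ([] : List Int) hp1 (by rw [List.length_set]; exact hlp),
    List.getElem_set]
  by_cases h1 : s.1.toNat = p.1.toNat
  · rw [if_pos h1]
    have hrl : m[s.1.toNat].length = (y+1).toNat := hrowlen _ (List.getElem_mem _)
    rw [PySem.List.pyGetD_eq_getElem _ (0 : Int) hp3
      (by rw [List.length_set, hrl]; omega), List.getElem_set]
    by_cases h2 : s.2.toNat = p.2.toNat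
    · rw [if_pos h2, if_pos (by
        have : p.1 = s.1 := by omega
        have : p.2 = s.2 := by omega
        exact Prod.ext (by omega) (by omega))]
    · rw [if_neg h2, if_neg (by
        intro h; subst h; exact h2 rfl)]
      simp only [h1]
      rw [atM, mgetA, PySem.List.pyGetD_eq_getElem m ([] : List Int) hp1 hlp,
        PySem.List.pyGetD_eq_getElem _ (0 : Int) hp3
          (by rw [hrowlen _ (List.getElem_mem _)]; omega)]
  · rw [if_neg h1, if_neg (by
      intro h; subst h; exact h1 rfl)]
    rw [atM, mgetA, PySem.List.pyGetD_eq_getElem m ([] : List Int) hp1 hlp]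

lemma zeros_mono {x y : Int} {a b : List (List Int)}
    (h : ∀ p, InB x y p → atM b p = 0 → atM a p = 0) : ZerosM x y b ≤ ZerosM x y a := by
  refine List.countP_mono_left fun p hp hb => ?_
  simp only [beq_iff_eq] at *
  exact h p (mem_cellsL.mp hp) hb

lemma zeros_strict {x y : Int} {a b : List (List Int)} {s : Int × Int}
    (hs : InB x y s) (h0 : atM a s = 0) (h1 : atM b s ≠ 0)
    (h : ∀ p, InB x y p → atM b p = 0 → atM a p = 0) : ZerosM x y b < ZerosM x y a := by
  have hsmem : s ∈ cellsL x y := mem_cellsL.mpr hs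
  obtain ⟨l1, l2, hsplit⟩ := List.append_of_mem hsmem
  unfold ZerosM
  rw [hsplit, List.countP_append, List.countP_append, List.countP_cons, List.countP_cons]
  have hb : (atM b s == 0) = false := by simpa using h1
  have ha : (atM a s == 0) = true := by simpa using h0
  rw [hb, ha]
  have m1 : List.countP (fun p => atM b p == 0) l1 ≤ List.countP (fun p => atM a p == 0) l1 := by
    refine List.countP_mono_left fun p hp hbp => ?_
    simp only [beq_iff_eq] at *
    exact h p (mem_cellsL.mp (by rw [hsplit]; simp [hp])) hbp
  have m2 : List.countP (fun p => atM b p == 0) l2 ≤ List.countP (fun p => atM a p == 0) l2 := by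
    refine List.countP_mono_left fun p hp hbp => ?_
    simp only [beq_iff_eq] at *
    exact h p (mem_cellsL.mp (by rw [hsplit]; simp [hp])) hbp
  simp only [Bool.false_eq_true, if_false, if_true]
  omega

lemma delta_zero {x y : Int} {a b : List (List Int)} (h : DeltaM x y a b) :
    ∀ p, InB x y p → atM b p = 0 → atM a p = 0 := by
  intro p hp h0
  rcases h p hp with h1 | ⟨h1, h2⟩
  · rw [← h1, h0]
  · omega

lemma delta_trans {x y : Int} {a b c : List (List Int)}
    (h1 : DeltaM x y a b) (h2 : DeltaM x y b c) : DeltaM x y a c := by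
  intro p hp
  rcases h2 p hp with h3 | ⟨h3, h4⟩ <;> rcases h1 p hp with h5 | ⟨h5, h6⟩
  · left; rw [h3, h5]
  · right; exact ⟨h5, by rw [h3, h6]⟩
  · right; exact ⟨by rw [← h5, h3], h4⟩
  · right; exact ⟨h5, h4⟩

lemma reach_mono {x y : Int} {f g : Int × Int → Prop} (h : ∀ q, InB x y q → f q → g q) :
    ∀ {p q}, Relation.ReflTransGen (StepRel x y f) p q →
      Relation.ReflTransGen (StepRel x y g) p q := by
  intro p q hr
  exact hr.mono fun a b ⟨hb1, hb2, hb3⟩ => ⟨hb1, hb2, h b hb2 hb3⟩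

-- ---- the DFS of A computes reachability ----

lemma oobA_false_iff (a b x y : Int) :
    outofboundsA a b x y = false ↔ (0 ≤ a ∧ a ≤ x ∧ 0 ≤ b ∧ b ≤ y) := by
  simp only [outofboundsA, Bool.or_eq_false_iff, decide_eq_false_iff_not]
  omega

def DfsSpec (x y : Int) (fuel : Nat) (m : List (List Int)) (s : Int × Int) : Prop :=
  ShapeM x y (dfsA x y fuel s.1 s.2 m).2 ∧
  atM (dfsA x y fuel s.1 s.2 m).2 s = 1 ∧
  (∀ p, InB x y p → p ≠ s →
    atM (dfsA x y fuel s.1 s.2 m).2 p = atM m p ∨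
      (atM m p = 0 ∧ atM (dfsA x y fuel s.1 s.2 m).2 p = 1)) ∧
  ((dfsA x y fuel s.1 s.2 m).1 = true →
    Relation.ReflTransGen (StepRel x y fun q => atM m q = 0) s (x, y)) ∧
  ((dfsA x y fuel s.1 s.2 m).1 = false →
    s ≠ (x, y) ∧ atM (dfsA x y fuel s.1 s.2 m).2 (x, y) = atM m (x, y) ∧
    Inv1 x y m (dfsA x y fuel s.1 s.2 m).2)

lemma dfsA_succ (x y : Int) (f : Nat) (x1 y1 : Int) (mat : List (List Int)) :
    dfsA x y (f+1) x1 y1 mat =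
      (if outofboundsA x1 y1 x y then (false, msetA mat x1 y1 1)
      else if x1 == x && y1 == y then (true, msetA mat x1 y1 1)
      else
        dfsLoopA x y f
          [(x1-1,y1),(x1+1,y1),(x1,y1+1),(x1,y1-1),(x1-1,y1-1),(x1+1,y1+1),(x1-1,y1+1),(x1+1,y1-1)]
          (false, msetA mat x1 y1 1)) := by
  rw [dfsA]

lemma dfsLoopA_nil (x y : Int) (f : Nat) (acc : Bool × List (List Int)) :
    dfsLoopA x y f [] acc = acc := by
  rw [dfsLoopA]

lemma dfsLoopA_cons (x y : Int) (f : Nat) (n : Int × Int) (ns : List (Int × Int))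
    (acc : Bool × List (List Int)) :
    dfsLoopA x y f (n :: ns) acc =
      dfsLoopA x y f ns
        (if (outofboundsA n.1 n.2 x y == false) && (mgetA acc.2 n.1 n.2 == 0) then
          (if acc.1 then acc else dfsA x y f n.1 n.2 acc.2)
        else acc) := by
  rw [dfsLoopA]

lemma dfsLoop_spec (x y : Int) (f : Nat)
    (hdfs : ∀ (m : List (List Int)) (s : Int × Int), ShapeM x y m → InB x y s →
      ZerosM x y m + (if atM m s = 0 then 0 else 1) < f → DfsSpec x y f m s)
    (s : Int × Int) (m1 : List (List Int)) (hz1 : ZerosM x y m1 < f) :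
    ∀ (ns : List (Int × Int)), (∀ q ∈ ns, q ∈ nbrsOf s) →
    ∀ (acc : Bool × List (List Int)),
      ShapeM x y acc.2 → DeltaM x y m1 acc.2 →
      (acc.1 = true → Relation.ReflTransGen (StepRel x y fun q => atM m1 q = 0) s (x, y)) →
      (acc.1 = false → Inv1 x y m1 acc.2 ∧ atM acc.2 (x, y) = atM m1 (x, y)) →
      ShapeM x y (dfsLoopA x y f ns acc).2 ∧
      DeltaM x y acc.2 (dfsLoopA x y f ns acc).2 ∧
      DeltaM x y m1 (dfsLoopA x y f ns acc).2 ∧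
      ((dfsLoopA x y f ns acc).1 = true →
        Relation.ReflTransGen (StepRel x y fun q => atM m1 q = 0) s (x, y)) ∧
      ((dfsLoopA x y f ns acc).1 = false → acc.1 = false ∧
        Inv1 x y m1 (dfsLoopA x y f ns acc).2 ∧
        atM (dfsLoopA x y f ns acc).2 (x, y) = atM m1 (x, y) ∧
        ∀ q ∈ ns, InB x y q → atM (dfsLoopA x y f ns acc).2 q ≠ 0) := by
  intro ns
  induction ns with
  | nil =>
    intro _ acc hS hD hT hF
    rw [dfsLoopA_nil]
    exact ⟨hS, fun p _ => Or.inl rfl, hD, hT, fun hf => ⟨hf, (hF hf).1, (hF hf).2, by simp⟩⟩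
  | cons n ns' ih =>
    intro hns acc hS hD hT hF
    rw [dfsLoopA_cons]
    by_cases hg : ((outofboundsA n.1 n.2 x y == false) && (mgetA acc.2 n.1 n.2 == 0)) = true
    · rw [if_pos hg]
      simp only [Bool.and_eq_true, beq_iff_eq] at hg
      have hInBn : InB x y n := by
        have := (oobA_false_iff n.1 n.2 x y).mp hg.1
        exact this
      have hm0 : atM acc.2 n = 0 := hg.2
      by_cases hacc : acc.1 = true
      · rw [if_pos hacc]
        obtain ⟨oS, oDacc, oD1, oT, oF⟩ := ih (fun q hq => hns q (by simp [hq])) acc hS hD hT hF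
        refine ⟨oS, oDacc, oD1, oT, fun hf => ?_⟩
        obtain ⟨h1, _⟩ := oF hf
        rw [h1] at hacc
        exact absurd hacc (by simp)
      · have hacc' : acc.1 = false := by revert hacc; cases acc.1 <;> simp
        rw [if_neg (by rw [hacc']; simp)]
        obtain ⟨hInvA, hTA⟩ := hF hacc'
        have hzacc : ZerosM x y acc.2 ≤ ZerosM x y m1 := zeros_mono (delta_zero hD)
        obtain ⟨cS, c1, cD, cT, cF⟩ := hdfs acc.2 n hS hInBn (by rw [if_pos hm0]; omega)
        have hDacc_o : DeltaM x y acc.2 (dfsA x y f n.1 n.2 acc.2).2 := by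
          intro p hp
          by_cases hpn : p = n
          · subst hpn
            exact Or.inr ⟨hm0, c1⟩
          · exact cD p hp hpn
        have hnot0 : ∀ q, InB x y q → atM acc.2 q ≠ 0 →
            atM (dfsA x y f n.1 n.2 acc.2).2 q ≠ 0 := by
          intro q hq hq0
          rcases hDacc_o q hq with h | ⟨h, _⟩
          · rw [h]; exact hq0
          · exact absurd h hq0
        have hfm1 : atM m1 n = 0 := delta_zero hD n hInBn hm0
        obtain ⟨oS, oDacc, oD1, oT, oF⟩ := ih (fun q hq => hns q (by simp [hq]))
          (dfsA x y f n.1 n.2 acc.2)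
          cS (delta_trans hD hDacc_o)
          (by
            intro h
            have hreach := cT h
            have hlift := reach_mono (x := x) (y := y)
              (f := fun q => atM acc.2 q = 0) (g := fun q => atM m1 q = 0)
              (delta_zero hD) hreach
            exact Relation.ReflTransGen.head ⟨hns n (by simp), hInBn, hfm1⟩ hlift)
          (by
            intro h
            obtain ⟨_, hT', hInv'⟩ := cF h
            constructor
            · intro p hp h1
              rcases hInv' p hp h1 with h2 | h2
              · rcases hInvA p hp h2 with h3 | h3
                · exact Or.inl h3
                · refine Or.inr fun q hq hqin => hnot0 q hqin (h3 q hq hqin)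
              · exact Or.inr h2
            · rw [hT', hTA])
        refine ⟨oS, delta_trans hDacc_o oDacc, oD1, oT, fun hf => ?_⟩
        obtain ⟨_, oInv, oT', oNs⟩ := oF hf
        refine ⟨hacc', oInv, oT', fun q hq hqin => ?_⟩
        rcases List.mem_cons.mp hq with hq | hq
        · subst hq
          have h1 : atM (dfsA x y f q.1 q.2 acc.2).2 q = 1 := c1
          rcases oDacc q hqin with h | ⟨h, h2⟩
          · rw [h, h1]; omega
          · rw [h1] at h; omega
        · exact oNs q hq hqin
    · rw [if_neg hg]
      obtain ⟨oS, oDacc, oD1, oT, oF⟩ := ih (fun q hq => hns q (by simp [hq])) acc hS hD hT hF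
      refine ⟨oS, oDacc, oD1, oT, fun hf => ?_⟩
      obtain ⟨h1, oInv, oT', oNs⟩ := oF hf
      refine ⟨h1, oInv, oT', fun q hq hqin => ?_⟩
      rcases List.mem_cons.mp hq with hq | hq
      · subst hq
        simp only [Bool.and_eq_true, beq_iff_eq] at hg
        have hoob : outofboundsA q.1 q.2 x y = false := by
          rw [oobA_false_iff]
          exact hqin
        have hq0 : atM acc.2 q ≠ 0 := by
          intro h0
          exact hg ⟨hoob, h0⟩
        rcases oDacc q hqin with h | ⟨h, h2⟩
        · rw [h]; exact hq0
        · exact absurd h hq0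
      · exact oNs q hq hqin

lemma dfs_spec (x y : Int) :
    ∀ (fuel : Nat) (m : List (List Int)) (s : Int × Int),
      ShapeM x y m → InB x y s →
      ZerosM x y m + (if atM m s = 0 then 0 else 1) < fuel →
      DfsSpec x y fuel m s := by
  intro fuel
  induction fuel using Nat.strong_induction_on with
  | _ fuel ih =>
    intro m s hShape hInB hfuel
    obtain ⟨f, rfl⟩ : ∃ f, fuel = f + 1 := ⟨fuel - 1, by omega⟩
    have hoob : outofboundsA s.1 s.2 x y = false := by
      rw [oobA_false_iff]
      exact hInB
    have hm1S : ShapeM x y (msetA m s.1 s.2 1) := shape_mset 1 hShape hInB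
    have hm1at : ∀ p, InB x y p →
        atM (msetA m s.1 s.2 1) p = if p = s then 1 else atM m p :=
      fun p hp => atM_mset 1 hShape hInB hp
    have hm1s : atM (msetA m s.1 s.2 1) s = 1 := by rw [hm1at s hInB, if_pos rfl]
    have hmono10 : ∀ p, InB x y p → atM (msetA m s.1 s.2 1) p = 0 → atM m p = 0 := by
      intro p hp h0
      rw [hm1at p hp] at h0
      by_cases hps : p = s
      · rw [if_pos hps] at h0; omega
      · rwa [if_neg hps] at h0
    have hz1 : ZerosM x y (msetA m s.1 s.2 1) < f + 1 := by
      by_cases h0 : atM m s = 0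
      · rw [if_pos h0] at hfuel
        have := zeros_strict hInB h0 (by rw [hm1s]; omega) hmono10
        omega
      · rw [if_neg h0] at hfuel
        have := zeros_mono hmono10
        omega
    unfold DfsSpec
    rw [dfsA_succ, if_neg (by rw [hoob]; simp)]
    by_cases hst : s = (x, y)
    · rw [if_pos (by rw [hst]; simp)]
      refine ⟨hm1S, hm1s, ?_, ?_, ?_⟩
      · intro p hp hps
        rw [hm1at p hp, if_neg hps]
        exact Or.inl rfl
      · intro _
        rw [hst]
      · intro h
        exact absurd h (by simp)
    · rw [if_neg (by
        simp only [Bool.and_eq_true, beq_iff_eq]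
        rintro ⟨h1, h2⟩
        exact hst (Prod.ext h1 h2))]
      rw [show ([(s.1-1,s.2),(s.1+1,s.2),(s.1,s.2+1),(s.1,s.2-1),(s.1-1,s.2-1),(s.1+1,s.2+1),(s.1-1,s.2+1),(s.1+1,s.2-1)] : List (Int × Int)) = nbrsOf s from rfl]
      have hz1' : ZerosM x y (msetA m s.1 s.2 1) < f := by
        by_cases h0 : atM m s = 0
        · rw [if_pos h0] at hfuel
          have := zeros_strict hInB h0 (by rw [hm1s]; omega) hmono10
          omega
        · rw [if_neg h0] at hfuel
          have := zeros_mono hmono10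
          omega
      obtain ⟨LS, LDacc, LD1, LT, LF⟩ := dfsLoop_spec x y f
        (fun m' s' h1 h2 h3 => ih f (by omega) m' s' h1 h2 h3)
        s (msetA m s.1 s.2 1) hz1' (nbrsOf s) (fun q hq => hq)
        (false, msetA m s.1 s.2 1) hm1S (fun p _ => Or.inl rfl)
        (by intro h; exact absurd h (by simp))
        (fun _ => ⟨fun p _ h1 => Or.inl h1, rfl⟩)
      refine ⟨LS, ?_, ?_, ?_, ?_⟩
      · rcases LD1 s hInB with h | ⟨_, h⟩
        · rw [h, hm1s]
        · exact h
      · intro p hp hps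
        rcases LD1 p hp with h | ⟨h, h2⟩
        · rw [h, hm1at p hp, if_neg hps]
          exact Or.inl rfl
        · rw [hm1at p hp, if_neg hps] at h
          exact Or.inr ⟨h, h2⟩
      · intro h
        have := LT h
        refine reach_mono ?_ this
        intro q hq h0
        exact hmono10 q hq h0
      · intro h
        obtain ⟨_, LInv, LT', LNs⟩ := LF h
        have htin : InB x y ((x, y) : Int × Int) := by
          obtain ⟨h1, h2, h3, h4⟩ := hInB
          exact ⟨by omega, le_refl _, by omega, le_refl _⟩
        refine ⟨hst, ?_, ?_⟩
        · rw [LT', hm1at _ htin, if_neg (fun hh => hst hh.symm)]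
        · intro p hp h1
          rcases LInv p hp h1 with h2 | h2
          · rw [hm1at p hp] at h2
            by_cases hps : p = s
            · subst hps
              refine Or.inr fun q hq hqin => LNs q hq hqin
            · rw [if_neg hps] at h2
              exact Or.inl h2
          · exact Or.inr h2

-- ---- characterization of A's obstacle matrix ----

lemma foldl_append_singleton_replicate {α ι : Type} (c : α) :
    ∀ (l : List ι) (init : List α),
      l.foldl (fun r _ => r ++ [c]) init = init ++ List.replicate l.length c := by
  intro l
  induction l with
  | nil => intro init; simp
  | cons i t ih =>
    intro init
    simp only [List.foldl_cons, ih, List.length_cons]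
    rw [List.replicate_succ]
    simp

lemma matInit_spec (x y : Int) (hx : 0 ≤ x) (hy : 0 ≤ y) :
    ShapeM x y
      ((PySem.List.pyRange 0 (x+1) 1).foldl
        (fun m _ => m ++ [(PySem.List.pyRange 0 (y+1) 1).foldl (fun r _ => r ++ [(0 : Int)]) []]) []) ∧
    ∀ p, InB x y p →
      atM ((PySem.List.pyRange 0 (x+1) 1).foldl
        (fun m _ => m ++ [(PySem.List.pyRange 0 (y+1) 1).foldl (fun r _ => r ++ [(0 : Int)]) []]) []) p = 0 := by
  rw [foldl_append_singleton_replicate, foldl_append_singleton_replicate]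
  simp only [List.nil_append, PySem.List.length_pyRange_one]
  constructor
  · refine ⟨by simp, ?_⟩
    intro r hr
    rw [List.eq_of_mem_replicate hr]
    simp
  · rintro ⟨p1, p2⟩ ⟨h1, h2, h3, h4⟩
    rw [atM, mgetA,
      PySem.List.pyGetD_eq_getElem _ ([] : List Int) h1 (by simp; omega),
      PySem.List.pyGetD_eq_getElem _ (0 : Int) h3 (by simp; omega)]
    simp

set_option maxHeartbeats 1000000 in
lemma markJ_spec (x y D ex ey : Int) (i : Int) (hi0 : 0 ≤ i) (hi1 : i ≤ x) :
    ∀ (js : List Int), (∀ j ∈ js, 0 ≤ j ∧ j ≤ y) → ∀ m, ShapeM x y m →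
      ShapeM x y (js.foldl (fun m j =>
        if distA (i, j) (ex, ey) ≤ D^2 then msetA m i j (-1) else m) m) ∧
      ∀ p, InB x y p →
        atM (js.foldl (fun m j =>
          if distA (i, j) (ex, ey) ≤ D^2 then msetA m i j (-1) else m) m) p =
          if p.1 = i ∧ p.2 ∈ js ∧ distA p (ex, ey) ≤ D^2 then -1 else atM m p := by
  intro js
  induction js with
  | nil => intro _ m hm; refine ⟨hm, fun p _ => ?_⟩; simp
  | cons j js' ih =>
    intro hb m hm
    have hj := hb j (by simp)
    have hsj : InB x y (i, j) := ⟨hi0, hi1, hj.1, hj.2⟩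
    have hm1 : ShapeM x y (if distA (i, j) (ex, ey) ≤ D^2 then msetA m i j (-1) else m) := by
      split
      · exact shape_mset (-1) hm hsj
      · exact hm
    obtain ⟨ihS, ihV⟩ := ih (fun j hj => hb j (by simp [hj])) _ hm1
    refine ⟨by rw [List.foldl_cons]; exact ihS, ?_⟩
    intro p hp
    rw [List.foldl_cons]
    rw [ihV p hp]
    have hmset : atM (if distA (i, j) (ex, ey) ≤ D^2 then msetA m i j (-1) else m) p =
        if p = (i, j) ∧ distA p (ex, ey) ≤ D^2 then -1 else atM m p := by
      split
      · rename_i hc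
        rw [atM_mset (-1) hm hsj hp]
        by_cases hpe : p = (i, j)
        · subst hpe; simp [hc]
        · simp [hpe]
      · rename_i hc
        rw [if_neg]
        rintro ⟨rfl, h2⟩
        exact hc h2
    rw [hmset]
    by_cases hP : p.1 = i ∧ p.2 ∈ js' ∧ distA p (ex, ey) ≤ D^2
    · rw [if_pos hP, if_pos ⟨hP.1, by simp [hP.2.1], hP.2.2⟩]
    · rw [if_neg hP]
      by_cases hpe : p = (i, j) ∧ distA p (ex, ey) ≤ D^2
      · rw [if_pos hpe, if_pos ⟨by rw [hpe.1], by simp [hpe.1], hpe.2⟩]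
      · rw [if_neg hpe, if_neg]
        rintro ⟨h1, h2, h3⟩
        rcases List.mem_cons.mp h2 with h2 | h2
        · exact hpe ⟨Prod.ext h1 h2, h3⟩
        · exact hP ⟨h1, h2, h3⟩

set_option maxHeartbeats 1000000 in
lemma markI_spec (x y D ex ey : Int) (hy : 0 ≤ y) :
    ∀ (is : List Int), (∀ i ∈ is, 0 ≤ i ∧ i ≤ x) → ∀ m, ShapeM x y m →
      ShapeM x y (is.foldl (fun m i =>
        (PySem.List.pyRange 0 (y+1) 1).foldl (fun m j =>
          if distA (i, j) (ex, ey) ≤ D^2 then msetA m i j (-1) else m) m) m) ∧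
      ∀ p, InB x y p →
        atM (is.foldl (fun m i =>
          (PySem.List.pyRange 0 (y+1) 1).foldl (fun m j =>
            if distA (i, j) (ex, ey) ≤ D^2 then msetA m i j (-1) else m) m) m) p =
          if p.1 ∈ is ∧ distA p (ex, ey) ≤ D^2 then -1 else atM m p := by
  intro is
  induction is with
  | nil => intro _ m hm; exact ⟨hm, fun p _ => rfl⟩
  | cons i is' ih =>
    intro hb m hm
    have hi := hb i (by simp)
    obtain ⟨jS, jV⟩ := markJ_spec x y D ex ey i hi.1 hi.2 (PySem.List.pyRange 0 (y+1) 1)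
      (fun j hj => by rw [PySem.List.mem_pyRange_one] at hj; omega) m hm
    obtain ⟨ihS, ihV⟩ := ih (fun i hi => hb i (by simp [hi])) _ jS
    refine ⟨by rw [List.foldl_cons]; exact ihS, ?_⟩
    intro p hp
    rw [List.foldl_cons, ihV p hp, jV p hp]
    have hmem : p.2 ∈ PySem.List.pyRange 0 (y+1) 1 := by
      rw [PySem.List.mem_pyRange_one]
      obtain ⟨_, _, h3, h4⟩ := hp
      omega
    by_cases hP : p.1 ∈ is' ∧ distA p (ex, ey) ≤ D^2
    · rw [if_pos hP, if_pos ⟨by simp [hP.1], hP.2⟩]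
    · rw [if_neg hP]
      by_cases hpe : p.1 = i ∧ distA p (ex, ey) ≤ D^2
      · rw [if_pos ⟨hpe.1, hmem, hpe.2⟩, if_pos ⟨by simp [hpe.1], hpe.2⟩]
      · rw [if_neg (by rintro ⟨h1, _, h3⟩; exact hpe ⟨h1, h3⟩), if_neg]
        rintro ⟨h1, h3⟩
        rcases List.mem_cons.mp h1 with h1 | h1
        · exact hpe ⟨h1, h3⟩
        · exact hP ⟨h1, h3⟩

set_option maxHeartbeats 1000000 in
lemma markC_spec (A B D : Int) (E F : List Int) (hA : 0 ≤ A) (hB : 0 ≤ B) :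
    ∀ (cs : List Int) (m : List (List Int)), ShapeM A B m →
      ShapeM A B (cs.foldl (fun m c =>
        (PySem.List.pyRange 0 (A+1) 1).foldl (fun m i =>
          (PySem.List.pyRange 0 (B+1) 1).foldl (fun m j =>
            if distA (i, j) (PySem.List.pyGetD E c 0, PySem.List.pyGetD F c 0) ≤ D^2 then
              msetA m i j (-1)
            else m) m) m) m) ∧
      ∀ p, InB A B p →
        atM (cs.foldl (fun m c =>
          (PySem.List.pyRange 0 (A+1) 1).foldl (fun m i =>
            (PySem.List.pyRange 0 (B+1) 1).foldl (fun m j =>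
              if distA (i, j) (PySem.List.pyGetD E c 0, PySem.List.pyGetD F c 0) ≤ D^2 then
                msetA m i j (-1)
              else m) m) m) m) p =
          if ∃ c ∈ cs,
              (p.1 - PySem.List.pyGetD E c 0)^2 + (p.2 - PySem.List.pyGetD F c 0)^2 ≤ D^2 then
            -1
          else atM m p := by
  intro cs
  induction cs with
  | nil => intro m hm; exact ⟨hm, fun p _ => rfl⟩
  | cons c cs' ih =>
    intro m hm
    obtain ⟨iS, iV⟩ := markI_spec A B D (PySem.List.pyGetD E c 0) (PySem.List.pyGetD F c 0) hB
      (PySem.List.pyRange 0 (A+1) 1)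
      (fun i hi => by rw [PySem.List.mem_pyRange_one] at hi; omega) m hm
    obtain ⟨ihS, ihV⟩ := ih _ iS
    refine ⟨by rw [List.foldl_cons]; exact ihS, ?_⟩
    intro p hp
    rw [List.foldl_cons, ihV p hp, iV p hp]
    have hmem : p.1 ∈ PySem.List.pyRange 0 (A+1) 1 := by
      rw [PySem.List.mem_pyRange_one]
      obtain ⟨h1, h2, _, _⟩ := hp
      omega
    have hdist : distA p (PySem.List.pyGetD E c 0, PySem.List.pyGetD F c 0) =
        (p.1 - PySem.List.pyGetD E c 0)^2 + (p.2 - PySem.List.pyGetD F c 0)^2 := rfl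
    by_cases hP : ∃ cc ∈ cs',
        (p.1 - PySem.List.pyGetD E cc 0)^2 + (p.2 - PySem.List.pyGetD F cc 0)^2 ≤ D^2
    · rw [if_pos hP, if_pos (by obtain ⟨cc, h1, h2⟩ := hP; exact ⟨cc, by simp [h1], h2⟩)]
    · rw [if_neg hP]
      by_cases hc : (p.1 - PySem.List.pyGetD E c 0)^2 + (p.2 - PySem.List.pyGetD F c 0)^2 ≤ D^2
      · rw [if_pos (by rw [hdist]; exact ⟨hmem, hc⟩), if_pos ⟨c, by simp, hc⟩]
      · rw [if_neg (by rw [hdist]; rintro ⟨_, h⟩; exact hc h), if_neg]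
        rintro ⟨cc, h1, h2⟩
        rcases List.mem_cons.mp h1 with h1 | h1
        · subst h1; exact hc h2
        · exact hP ⟨cc, h1, h2⟩

lemma mat0_spec (A B C D : Int) (E F : List Int) (hA : 0 ≤ A) (hB : 0 ≤ B) :
    ShapeM A B
      ((PySem.List.pyRange 0 C 1).foldl (fun m c =>
        (PySem.List.pyRange 0 (A+1) 1).foldl (fun m i =>
          (PySem.List.pyRange 0 (B+1) 1).foldl (fun m j =>
            if distA (i, j) (PySem.List.pyGetD E c 0, PySem.List.pyGetD F c 0) ≤ D^2 then
              msetA m i j (-1)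
            else m) m) m)
        ((PySem.List.pyRange 0 (A+1) 1).foldl
          (fun m _ => m ++ [(PySem.List.pyRange 0 (B+1) 1).foldl (fun r _ => r ++ [(0 : Int)]) []]) [])) ∧
    ∀ p, InB A B p →
      (atM ((PySem.List.pyRange 0 C 1).foldl (fun m c =>
        (PySem.List.pyRange 0 (A+1) 1).foldl (fun m i =>
          (PySem.List.pyRange 0 (B+1) 1).foldl (fun m j =>
            if distA (i, j) (PySem.List.pyGetD E c 0, PySem.List.pyGetD F c 0) ≤ D^2 then
              msetA m i j (-1)
            else m) m) m)
        ((PySem.List.pyRange 0 (A+1) 1).foldl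
          (fun m _ => m ++ [(PySem.List.pyRange 0 (B+1) 1).foldl (fun r _ => r ++ [(0 : Int)]) []]) [])) p
        = if BlkP C D E F p then -1 else 0) := by
  obtain ⟨hS0, hV0⟩ := matInit_spec A B hA hB
  obtain ⟨hS, hV⟩ := markC_spec A B D E F hA hB (PySem.List.pyRange 0 C 1) _ hS0
  refine ⟨hS, ?_⟩
  intro p hp
  rw [hV p hp, hV0 p hp]

-- ---- A's solve in terms of reachability ----

lemma solveA_char (A B C D : Int) (E F : List Int) (h : Pre_solve A B C D E F) :
    (solve A B C D E F = "YES" ↔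
      ¬ BlkP C D E F (A, B) ∧
        Relation.ReflTransGen (StepRel A B (fun q => ¬ BlkP C D E F q)) (0, 0) (A, B)) ∧
    (solve A B C D E F = "YES" ∨ solve A B C D E F = "NO") := by
  obtain ⟨hA, hB, _⟩ := h
  have htin : InB A B ((A, B) : Int × Int) := ⟨hA, le_refl _, hB, le_refl _⟩
  have hsin : InB A B ((0:Int), (0:Int)) := ⟨le_refl _, hA, le_refl _, hB⟩
  unfold solve
  simp only []
  set mat0 := (PySem.List.pyRange 0 C 1).foldl (fun m c =>
      (PySem.List.pyRange 0 (A+1) 1).foldl (fun m i =>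
        (PySem.List.pyRange 0 (B+1) 1).foldl (fun m j =>
          if distA (i, j) (PySem.List.pyGetD E c 0, PySem.List.pyGetD F c 0) ≤ D^2 then
            msetA m i j (-1)
          else m) m) m)
      ((PySem.List.pyRange 0 (A+1) 1).foldl
        (fun m _ => m ++ [(PySem.List.pyRange 0 (B+1) 1).foldl (fun r _ => r ++ [(0 : Int)]) []]) [])
    with hmat0_def
  obtain ⟨hS0, hV0⟩ := mat0_spec A B C D E F hA hB
  rw [← hmat0_def] at hS0 hV0
  by_cases hblk : BlkP C D E F (A, B)
  · have h1 : atM mat0 (A, B) = -1 := by rw [hV0 _ htin, if_pos hblk]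
    rw [if_pos (by
      show (mgetA mat0 A B == -1) = true
      rw [show mgetA mat0 A B = atM mat0 (A, B) from rfl, h1]
      rfl)]
    refine ⟨⟨fun hno => absurd hno (by decide), ?_⟩, Or.inr rfl⟩
    rintro ⟨hnb, _⟩
    exact absurd hblk hnb
  · have h1 : atM mat0 (A, B) = 0 := by rw [hV0 _ htin, if_neg hblk]
    rw [if_neg (by
      show ¬ (mgetA mat0 A B == -1) = true
      rw [show mgetA mat0 A B = atM mat0 (A, B) from rfl, h1]
      decide)]
    have hzb : ZerosM A B mat0 ≤ ((A+1)*(B+1)).toNat := by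
      have h2 := List.countP_le_length (l := cellsL A B) (p := fun p => atM mat0 p == 0)
      rwa [length_cellsL hA hB] at h2
    obtain ⟨cS, c1, cD, cT, cF⟩ := dfs_spec A B (((A+1)*(B+1)).toNat + 2) mat0 (0, 0)
      hS0 hsin (by split <;> omega)
    by_cases hr : (dfsA A B (((A+1)*(B+1)).toNat + 2) 0 0 mat0).1 = true
    · rw [if_pos hr]
      refine ⟨⟨fun _ => ⟨hblk, ?_⟩, fun _ => rfl⟩, Or.inl rfl⟩
      refine reach_mono ?_ (cT hr)
      intro q hq h0
      intro hb
      rw [hV0 q hq, if_pos hb] at h0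
      omega
    · rw [if_neg hr]
      have hr' : (dfsA A B (((A+1)*(B+1)).toNat + 2) 0 0 mat0).1 = false := by
        revert hr; cases (dfsA A B (((A+1)*(B+1)).toNat + 2) 0 0 mat0).1 <;> simp
      obtain ⟨hne, hTat, hInv⟩ := cF hr'
      refine ⟨⟨fun hno => absurd hno (by decide), ?_⟩, Or.inr rfl⟩
      rintro ⟨_, hreach⟩
      have hreach' : Relation.ReflTransGen (StepRel A B fun q => atM mat0 q = 0)
          (0, 0) (A, B) := by
        refine reach_mono ?_ hreach
        intro q hq hfree
        rw [hV0 q hq, if_neg hfree]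
      have hclimb : ∀ u, Relation.ReflTransGen (StepRel A B fun q => atM mat0 q = 0)
          (0, 0) u → InB A B u ∧ atM (dfsA A B (((A+1)*(B+1)).toNat + 2) 0 0 mat0).2 u = 1 := by
        intro u hu
        induction hu with
        | refl => exact ⟨hsin, c1⟩
        | @tail b' c' hsteps hstep ihc =>
          obtain ⟨hmem, hinbc, hfreec⟩ := hstep
          obtain ⟨hinbb, hb1⟩ := ihc
          have hcl : ∀ q ∈ nbrsOf b', InB A B q →
              atM (dfsA A B (((A+1)*(B+1)).toNat + 2) 0 0 mat0).2 q ≠ 0 := by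
            rcases hInv b' hinbb hb1 with h2 | h2
            · rw [hV0 b' hinbb] at h2
              split at h2 <;> omega
            · exact h2
          have hne0 := hcl c' hmem hinbc
          refine ⟨hinbc, ?_⟩
          by_cases hcs : c' = ((0:Int), (0:Int))
          · rw [hcs]; exact c1
          · rcases cD c' hinbc hcs with h3 | h3
            · rw [h3] at hne0
              exact absurd hfreec hne0
            · exact h3.2
      have hfin := (hclimb (A, B) hreach').2
      rw [hTat, h1] at hfin
      exact absurd hfin (by decide)

-- ---- B's blocked set ----

lemma mem_foldl_setgen {ι β : Type} (g : List β → ι → List β) (P : ι → β → Prop)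
    (h : ∀ s i p, p ∈ g s i ↔ p ∈ s ∨ P i p) :
    ∀ (l : List ι) (s0 : List β) (p : β),
      p ∈ l.foldl g s0 ↔ p ∈ s0 ∨ ∃ i ∈ l, P i p := by
  intro l
  induction l with
  | nil => intro s0 p; simp
  | cons i t ih =>
    intro s0 p
    rw [List.foldl_cons, ih, h]
    constructor
    · rintro ((h1 | h1) | ⟨j, h1, h2⟩)
      · exact Or.inl h1
      · exact Or.inr ⟨i, by simp, h1⟩
      · exact Or.inr ⟨j, by simp [h1], h2⟩
    · rintro (h1 | ⟨j, h1, h2⟩)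
      · exact Or.inl (Or.inl h1)
      · rcases List.mem_cons.mp h1 with h1 | h1
        · subst h1; exact Or.inl (Or.inr h2)
        · exact Or.inr ⟨j, h1, h2⟩

lemma mem_blockedB (A B C D : Int) (E F : List Int) {p : Int × Int} (hp : InB A B p) :
    (p ∈ (PySem.List.pyRange 0 C 1).foldl (fun bl c =>
      let x0 := PySem.List.pyGetD E c 0
      let y0 := PySem.List.pyGetD F c 0
      (PySem.List.pyRange (max 0 (x0 - |D|)) (min A (x0 + |D|) + 1) 1).foldl (fun bl i =>
        (PySem.List.pyRange (max 0 (y0 - |D|)) (min B (y0 + |D|) + 1) 1).foldl (fun bl j =>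
          if (i - x0)^2 + (j - y0)^2 ≤ D * D then PySem.Set.add bl (i, j) else bl) bl) bl)
      PySem.Set.empty) ↔ BlkP C D E F p := by
  have hmemj : ∀ (x0 y0 : Int) (bl : PySem.Set (Int × Int)) (i : Int) (q : Int × Int),
      q ∈ (PySem.List.pyRange (max 0 (y0 - |D|)) (min B (y0 + |D|) + 1) 1).foldl (fun bl j =>
        if (i - x0)^2 + (j - y0)^2 ≤ D * D then PySem.Set.add bl (i, j) else bl) bl ↔
      q ∈ bl ∨ ∃ j ∈ PySem.List.pyRange (max 0 (y0 - |D|)) (min B (y0 + |D|) + 1) 1,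
        ((i - x0)^2 + (j - y0)^2 ≤ D * D ∧ q = (i, j)) := by
    intro x0 y0 bl i q
    refine mem_foldl_setgen _ (fun j q => (i - x0)^2 + (j - y0)^2 ≤ D * D ∧ q = (i, j)) ?_ _ bl q
    intro s j q
    split
    · rename_i hc
      rw [PySem.Set.mem_add]
      constructor
      · rintro (h1 | h1)
        · exact Or.inl h1
        · exact Or.inr ⟨hc, h1⟩
      · rintro (h1 | ⟨_, h1⟩)
        · exact Or.inl h1
        · exact Or.inr h1
    · rename_i hc
      constructor
      · exact Or.inl
      · rintro (h1 | ⟨h1, _⟩)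
        · exact h1
        · exact absurd h1 hc
  have hmemi : ∀ (x0 y0 : Int) (bl : PySem.Set (Int × Int)) (q : Int × Int),
      q ∈ (PySem.List.pyRange (max 0 (x0 - |D|)) (min A (x0 + |D|) + 1) 1).foldl (fun bl i =>
        (PySem.List.pyRange (max 0 (y0 - |D|)) (min B (y0 + |D|) + 1) 1).foldl (fun bl j =>
          if (i - x0)^2 + (j - y0)^2 ≤ D * D then PySem.Set.add bl (i, j) else bl) bl) bl ↔
      q ∈ bl ∨ ∃ i ∈ PySem.List.pyRange (max 0 (x0 - |D|)) (min A (x0 + |D|) + 1) 1,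
        ∃ j ∈ PySem.List.pyRange (max 0 (y0 - |D|)) (min B (y0 + |D|) + 1) 1,
          ((i - x0)^2 + (j - y0)^2 ≤ D * D ∧ q = (i, j)) := by
    intro x0 y0 bl q
    exact mem_foldl_setgen _ (fun i q => ∃ j ∈ _, ((i - x0)^2 + (j - y0)^2 ≤ D * D ∧ q = (i, j)))
      (fun s i q => hmemj x0 y0 s i q) _ bl q
  rw [mem_foldl_setgen _
    (fun c q => ∃ i ∈ PySem.List.pyRange (max 0 (PySem.List.pyGetD E c 0 - |D|))
        (min A (PySem.List.pyGetD E c 0 + |D|) + 1) 1,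
      ∃ j ∈ PySem.List.pyRange (max 0 (PySem.List.pyGetD F c 0 - |D|))
          (min B (PySem.List.pyGetD F c 0 + |D|) + 1) 1,
        ((i - PySem.List.pyGetD E c 0)^2 + (j - PySem.List.pyGetD F c 0)^2 ≤ D * D ∧ q = (i, j)))
    (fun s c q => hmemi (PySem.List.pyGetD E c 0) (PySem.List.pyGetD F c 0) s q)]
  simp only [PySem.Set.empty, List.not_mem_nil, false_or]
  unfold BlkP
  constructor
  · rintro ⟨c, hc, i, hi, j, hj, hd, rfl⟩
    exact ⟨c, hc, by nlinarith [sq_nonneg D]⟩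
  · rintro ⟨c, hc, hd⟩
    obtain ⟨hp1, hp2, hp3, hp4⟩ := hp
    set x0 := PySem.List.pyGetD E c 0 with hx0
    set y0 := PySem.List.pyGetD F c 0 with hy0
    have habs : (0:Int) ≤ |D| := abs_nonneg D
    have hD2 : D^2 = |D| * |D| := by rw [abs_mul_abs_self]; ring
    have h1 : (p.1 - x0)^2 ≤ |D| * |D| := by nlinarith [sq_nonneg (p.2 - y0)]
    have h2 : (p.2 - y0)^2 ≤ |D| * |D| := by nlinarith [sq_nonneg (p.1 - x0)]
    have hb1 : x0 - |D| ≤ p.1 ∧ p.1 ≤ x0 + |D| := by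
      constructor <;> nlinarith [sq_nonneg (p.1 - x0 + |D|), sq_nonneg (p.1 - x0 - |D|)]
    have hb2 : y0 - |D| ≤ p.2 ∧ p.2 ≤ y0 + |D| := by
      constructor <;> nlinarith [sq_nonneg (p.2 - y0 + |D|), sq_nonneg (p.2 - y0 - |D|)]
    refine ⟨c, hc, p.1, ?_, p.2, ?_, ?_, rfl⟩
    · rw [PySem.List.mem_pyRange_one]
      omega
    · rw [PySem.List.mem_pyRange_one]
      omega
    · nlinarith

-- ---- B's BFS computes reachability ----

lemma nbrs_eq_dirs (p : Int × Int) :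
    nbrsOf p = dirsB.map (fun d => (p.1 + d.1, p.2 + d.2)) := by
  simp only [nbrsOf, dirsB, List.map_cons, List.map_nil, Prod.mk.injEq, List.cons.injEq]
  norm_num
  constructor <;> [ring; constructor <;> [ring; constructor <;> [ring; ring]]]

lemma dirs_fold_spec (A B : Int) (blocked : PySem.Set (Int × Int)) (p : Int × Int) :
    ∀ (ds : List (Int × Int)) (st : PySem.Set (Int × Int) × List (Int × Int)),
      ∃ k : List (Int × Int),
        ds.foldl (fun st d =>
          if decide (0 ≤ p.1 + d.1) && decide (p.1 + d.1 ≤ A) && decide (0 ≤ p.2 + d.2)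
              && decide (p.2 + d.2 ≤ B) && !(PySem.Set.contains st.1 (p.1 + d.1, p.2 + d.2))
              && !(PySem.Set.contains blocked (p.1 + d.1, p.2 + d.2)) then
            (PySem.Set.add st.1 (p.1 + d.1, p.2 + d.2), st.2 ++ [(p.1 + d.1, p.2 + d.2)])
          else st) st = (st.1 ++ k, st.2 ++ k) ∧
        k.Nodup ∧
        (∀ q ∈ k, q ∉ st.1 ∧ q ∈ ds.map (fun d => (p.1 + d.1, p.2 + d.2)) ∧
          InB A B q ∧ q ∉ blocked) ∧
        (∀ d ∈ ds, InB A B (p.1 + d.1, p.2 + d.2) → (p.1 + d.1, p.2 + d.2) ∉ blocked →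
          (p.1 + d.1, p.2 + d.2) ∈ st.1 ++ k) := by
  intro ds
  induction ds with
  | nil =>
    intro st
    exact ⟨[], by simp, by simp, by simp, by simp⟩
  | cons d ds' ih =>
    intro st
    rw [List.foldl_cons]
    by_cases hg : (decide (0 ≤ p.1 + d.1) && decide (p.1 + d.1 ≤ A) && decide (0 ≤ p.2 + d.2)
        && decide (p.2 + d.2 ≤ B) && !(PySem.Set.contains st.1 (p.1 + d.1, p.2 + d.2))
        && !(PySem.Set.contains blocked (p.1 + d.1, p.2 + d.2))) = true
    · have hinb : InB A B (p.1 + d.1, p.2 + d.2) := by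
        simp only [Bool.and_eq_true, decide_eq_true_eq] at hg
        exact ⟨hg.1.1.1.1.1, hg.1.1.1.1.2, hg.1.1.1.2, hg.1.1.2⟩
      have hnv : (p.1 + d.1, p.2 + d.2) ∉ st.1 := by
        simp only [Bool.and_eq_true, Bool.not_eq_true'] at hg
        intro hm
        rw [← PySem.Set.contains_iff] at hm
        rw [hg.1.2] at hm
        exact Bool.false_ne_true hm
      have hnb : (p.1 + d.1, p.2 + d.2) ∉ blocked := by
        simp only [Bool.and_eq_true, Bool.not_eq_true'] at hg
        intro hm
        rw [← PySem.Set.contains_iff] at hm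
        rw [hg.2] at hm
        exact Bool.false_ne_true hm
      have hred : (if decide (0 ≤ p.1 + d.1) && decide (p.1 + d.1 ≤ A) && decide (0 ≤ p.2 + d.2)
              && decide (p.2 + d.2 ≤ B) && !(PySem.Set.contains st.1 (p.1 + d.1, p.2 + d.2))
              && !(PySem.Set.contains blocked (p.1 + d.1, p.2 + d.2)) then
            (PySem.Set.add st.1 (p.1 + d.1, p.2 + d.2), st.2 ++ [(p.1 + d.1, p.2 + d.2)])
          else st) = (st.1 ++ [(p.1 + d.1, p.2 + d.2)], st.2 ++ [(p.1 + d.1, p.2 + d.2)]) := by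
        rw [if_pos hg, PySem.Set.add_of_not_mem hnv]
      rw [hred]
      obtain ⟨k', hst', hnd', hmem', hcomp'⟩ :=
        ih (st.1 ++ [(p.1 + d.1, p.2 + d.2)], st.2 ++ [(p.1 + d.1, p.2 + d.2)])
      refine ⟨(p.1 + d.1, p.2 + d.2) :: k', ?_, ?_, ?_, ?_⟩
      · rw [hst']
        simp
      · refine List.Nodup.cons ?_ hnd'
        intro hqk
        exact ((hmem' _ hqk).1) (by simp)
      · intro r hr
        rcases List.mem_cons.mp hr with hr | hr
        · subst hr
          exact ⟨hnv, by simp, hinb, hnb⟩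
        · obtain ⟨h1, h2, h3, h4⟩ := hmem' r hr
          refine ⟨fun hin => h1 (by simp [hin]), ?_, h3, h4⟩
          simp only [List.map_cons]
          exact List.mem_cons_of_mem _ h2
      · intro d' hd' hinb' hnb'
        rcases List.mem_cons.mp hd' with hd' | hd'
        · subst hd'
          simp
        · have := hcomp' d' hd' hinb' hnb'
          simp only [List.append_assoc, List.singleton_append] at this ⊢
          exact this
    · rw [if_neg hg]
      obtain ⟨k', hst', hnd', hmem', hcomp'⟩ := ih st
      refine ⟨k', hst', hnd', ?_, ?_⟩
      · intro r hr
        obtain ⟨h1, h2, h3, h4⟩ := hmem' r hr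
        exact ⟨h1, List.mem_cons_of_mem _ h2, h3, h4⟩
      · intro d' hd' hinb' hnb'
        rcases List.mem_cons.mp hd' with hd' | hd'
        · subst hd'
          obtain ⟨h1, h2, h3, h4⟩ := hinb'
          cases hcb : PySem.Set.contains st.1 (p.1 + d'.1, p.2 + d'.2) with
          | true =>
            rw [PySem.Set.contains_iff] at hcb
            exact List.mem_append_left _ hcb
          | false =>
            exfalso
            cases hcb2 : PySem.Set.contains blocked (p.1 + d'.1, p.2 + d'.2) with
            | true =>
              rw [PySem.Set.contains_iff] at hcb2
              exact hnb' hcb2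
            | false =>
              apply hg
              simp only [Bool.and_eq_true, decide_eq_true_eq, Bool.not_eq_true']
              exact ⟨⟨⟨⟨⟨h1, h2⟩, h3⟩, h4⟩, hcb⟩, hcb2⟩
        · exact hcomp' d' hd' hinb' hnb'

lemma frontier_fold_spec (A B : Int) (blocked : PySem.Set (Int × Int)) :
    ∀ (fr : List (Int × Int)) (st : PySem.Set (Int × Int) × List (Int × Int)),
      ∃ k : List (Int × Int),
        fr.foldl (fun st p =>
          dirsB.foldl (fun st d =>
            if decide (0 ≤ p.1 + d.1) && decide (p.1 + d.1 ≤ A) && decide (0 ≤ p.2 + d.2)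
                && decide (p.2 + d.2 ≤ B) && !(PySem.Set.contains st.1 (p.1 + d.1, p.2 + d.2))
                && !(PySem.Set.contains blocked (p.1 + d.1, p.2 + d.2)) then
              (PySem.Set.add st.1 (p.1 + d.1, p.2 + d.2), st.2 ++ [(p.1 + d.1, p.2 + d.2)])
            else st) st) st = (st.1 ++ k, st.2 ++ k) ∧
        k.Nodup ∧
        (∀ q ∈ k, q ∉ st.1 ∧ ∃ p ∈ fr, StepRel A B (fun q => ¬ q ∈ blocked) p q) ∧
        (∀ p ∈ fr, ∀ q, StepRel A B (fun q => ¬ q ∈ blocked) p q → q ∈ st.1 ++ k) := by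
  intro fr
  induction fr with
  | nil =>
    intro st
    exact ⟨[], by simp, by simp, by simp, by simp⟩
  | cons p fr' ih =>
    intro st
    rw [List.foldl_cons]
    obtain ⟨k1, hst1, hnd1, hmem1, hcomp1⟩ := dirs_fold_spec A B blocked p dirsB st
    rw [hst1]
    obtain ⟨k2, hst2, hnd2, hmem2, hcomp2⟩ := ih (st.1 ++ k1, st.2 ++ k1)
    refine ⟨k1 ++ k2, by rw [hst2]; simp, ?_, ?_, ?_⟩
    · refine List.Nodup.append hnd1 hnd2 ?_
      intro a ha1 ha2
      exact (hmem2 a ha2).1 (List.mem_append_right _ ha1)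
    · intro r hr
      rcases List.mem_append.mp hr with hr | hr
      · obtain ⟨h1, h2, h3, h4⟩ := hmem1 r hr
        refine ⟨h1, p, by simp, ?_⟩
        rw [← nbrs_eq_dirs] at h2
        exact ⟨h2, h3, h4⟩
      · obtain ⟨h1, p', hp', hs⟩ := hmem2 r hr
        exact ⟨fun hin => h1 (List.mem_append_left _ hin), p', List.mem_cons_of_mem _ hp', hs⟩
    · intro p' hp' r hs
      rcases List.mem_cons.mp hp' with hp' | hp'
      · subst hp'
        obtain ⟨hn, hinb, hfree⟩ := hs
        rw [nbrs_eq_dirs] at hn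
        obtain ⟨d, hd, rfl⟩ := List.mem_map.mp hn
        have := hcomp1 d hd hinb hfree
        rcases List.mem_append.mp this with h | h
        · exact List.mem_append_left _ h
        · exact List.mem_append_right _ (List.mem_append_left _ h)
      · have := hcomp2 p' hp' r hs
        simpa [List.append_assoc] using this

lemma closed_complete (A B : Int) (free : Int × Int → Prop) (vis : List (Int × Int))
    (hs : ((0:Int), (0:Int)) ∈ vis)
    (hcl : ∀ p ∈ vis, ∀ q, StepRel A B free p q → q ∈ vis) :
    ∀ u, Relation.ReflTransGen (StepRel A B free) (0, 0) u → u ∈ vis := by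
  intro u h
  induction h with
  | refl => exact hs
  | tail _ hstep ih => exact hcl _ ih _ hstep

lemma bfsB_spec (A B : Int) (hA : 0 ≤ A) (hB : 0 ≤ B) (blocked : PySem.Set (Int × Int)) :
    ∀ (fuel : Nat) (vis : List (Int × Int)) (frontier : List (Int × Int)),
      vis.Nodup → (∀ p ∈ vis, InB A B p) → (∀ p ∈ frontier, p ∈ vis) →
      (∀ p ∈ vis, Relation.ReflTransGen (StepRel A B (fun q => ¬ q ∈ blocked)) (0, 0) p) →
      (0, 0) ∈ vis →
      (∀ p ∈ vis, p ∉ frontier → ∀ q, StepRel A B (fun q => ¬ q ∈ blocked) p q → q ∈ vis) →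
      ((A+1)*(B+1)).toNat + 2 ≤ fuel + vis.length →
      ∀ u, u ∈ bfsB A B blocked fuel vis frontier ↔
        Relation.ReflTransGen (StepRel A B (fun q => ¬ q ∈ blocked)) (0, 0) u := by
  intro fuel
  induction fuel with
  | zero =>
    intro vis frontier hnd hinb _ _ _ _ hfuel
    exfalso
    have hsub : vis ⊆ cellsL A B := fun p hp => mem_cellsL.mpr (hinb p hp)
    have hvl : vis.length ≤ ((A+1)*(B+1)).toNat := by
      have := (List.subperm_of_subset hnd hsub).length_le
      rwa [length_cellsL hA hB] at this
    omega
  | succ f ih =>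
    intro vis frontier hnd hinb hfv hreach hs hcl hfuel
    have hsub : vis ⊆ cellsL A B := fun p hp => mem_cellsL.mpr (hinb p hp)
    have hvl : vis.length ≤ ((A+1)*(B+1)).toNat := by
      have := (List.subperm_of_subset hnd hsub).length_le
      rwa [length_cellsL hA hB] at this
    intro u
    rw [bfsB]
    by_cases hfe : frontier.isEmpty
    · rw [if_pos hfe]
      constructor
      · exact fun hu => hreach u hu
      · refine closed_complete A B _ vis hs (fun p hp q hq => ?_) u
        exact hcl p hp (by rw [List.isEmpty_iff] at hfe; simp [hfe]) q hq
    · rw [if_neg hfe]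
      obtain ⟨k, hst, hndk, hmemk, hcompk⟩ :=
        frontier_fold_spec A B blocked frontier (vis, ([] : List (Int × Int)))
      rw [hst]
      by_cases hk : k = []
      · subst hk
        obtain ⟨f', rfl⟩ : ∃ f', f = f' + 1 := ⟨f - 1, by omega⟩
        rw [bfsB]
        rw [if_pos (by simp)]
        simp only [List.append_nil]
        constructor
        · exact fun hu => hreach u hu
        · refine closed_complete A B _ vis hs (fun p hp q hq => ?_) u
          by_cases hpf : p ∈ frontier
          · have := hcompk p hpf q hq
            simpa using this
          · exact hcl p hp hpf q hq
      · show u ∈ bfsB A B blocked f (vis ++ k) k ↔ _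
        refine (ih (vis ++ k) k ?_ ?_ ?_ ?_ ?_ ?_ ?_) u
        · refine hnd.append hndk ?_
          intro a ha hak
          exact (hmemk a hak).1 ha
        · intro p hp
          rcases List.mem_append.mp hp with hp | hp
          · exact hinb p hp
          · obtain ⟨_, _, _, _, hinbq, _⟩ := hmemk p hp
            exact hinbq
        · exact fun p hp => List.mem_append_right _ hp
        · intro p hp
          rcases List.mem_append.mp hp with hp | hp
          · exact hreach p hp
          · obtain ⟨_, p', hp', hstep⟩ := hmemk p hp
            exact (hreach p' (hfv p' hp')).tail hstep
        · exact List.mem_append_left _ hs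
        · intro p hp hpk q hq
          rcases List.mem_append.mp hp with hp | hp
          · by_cases hpf : p ∈ frontier
            · have := hcompk p hpf q hq
              simpa using this
            · exact List.mem_append_left _ (hcl p hp hpf q hq)
          · exact absurd hp hpk
        · rw [List.length_append]
          have : 1 ≤ k.length := by
            cases k
            · exact absurd rfl hk
            · simp
          omega

lemma solveB_char (A B C D : Int) (E F : List Int) (h : Pre_solve A B C D E F) :
    (solve_alt A B C D E F = "YES" ↔
      ¬ BlkP C D E F (A, B) ∧
        Relation.ReflTransGen (StepRel A B (fun q => ¬ BlkP C D E F q)) (0, 0) (A, B)) ∧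
    (solve_alt A B C D E F = "YES" ∨ solve_alt A B C D E F = "NO") := by
  obtain ⟨hA, hB, _⟩ := h
  have htin : InB A B (A, B) := ⟨hA, le_refl _, hB, le_refl _⟩
  have hsin : InB A B ((0:Int), (0:Int)) := ⟨le_refl _, hA, le_refl _, hB⟩
  unfold solve_alt
  simp only []
  set bl := (PySem.List.pyRange 0 C 1).foldl (fun bl c =>
      (PySem.List.pyRange (max 0 (PySem.List.pyGetD E c 0 - |D|))
          (min A (PySem.List.pyGetD E c 0 + |D|) + 1) 1).foldl (fun bl i =>
        (PySem.List.pyRange (max 0 (PySem.List.pyGetD F c 0 - |D|))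
            (min B (PySem.List.pyGetD F c 0 + |D|) + 1) 1).foldl (fun bl j =>
          if (i - PySem.List.pyGetD E c 0)^2 + (j - PySem.List.pyGetD F c 0)^2 ≤ D * D then
            PySem.Set.add bl (i, j)
          else bl) bl) bl) PySem.Set.empty with hbl_def
  have hblc : ∀ p, InB A B p → (p ∈ bl ↔ BlkP C D E F p) := by
    intro p hp
    rw [hbl_def]
    exact mem_blockedB A B C D E F hp
  by_cases hc : PySem.Set.contains bl (A, B) = true
  · rw [if_pos hc]
    have hblk : BlkP C D E F (A, B) := (hblc _ htin).mp (by rwa [PySem.Set.contains_iff] at hc)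
    constructor
    · constructor
      · intro hno
        exact absurd hno (by decide)
      · rintro ⟨hnb, _⟩
        exact absurd hblk hnb
    · exact Or.inr rfl
  · rw [if_neg hc]
    have hnblk : ¬ BlkP C D E F (A, B) := by
      intro hb
      apply hc
      rw [PySem.Set.contains_iff]
      exact (hblc _ htin).mpr hb
    have hof : PySem.Set.ofList [((0:Int), (0:Int))] = [((0:Int), (0:Int))] := by decide
    have hspec := bfsB_spec A B hA hB bl (((A+1)*(B+1)).toNat + 2)
      [((0:Int), (0:Int))] [((0:Int), (0:Int))]
      (by simp) (by intro p hp; simp at hp; subst hp; exact hsin)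
      (fun p hp => hp)
      (by intro p hp; simp at hp; subst hp; exact Relation.ReflTransGen.refl)
      (by simp)
      (by intro p hp hpf; exact absurd hp hpf)
      (by omega)
    rw [hof]
    have hiff := hspec (A, B)
    by_cases hv : PySem.Set.contains
        (bfsB A B bl (((A+1)*(B+1)).toNat + 2) [((0:Int), (0:Int))] [((0:Int), (0:Int))]) (A, B) = true
    · rw [if_pos hv]
      refine ⟨⟨fun _ => ⟨hnblk, ?_⟩, fun _ => rfl⟩, Or.inl rfl⟩
      exact reach_mono (fun q hq hf hb => hf ((hblc q hq).mpr hb))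
        (hiff.mp (by rwa [PySem.Set.contains_iff] at hv))
    · rw [if_neg hv]
      refine ⟨⟨fun hno => absurd hno (by decide), ?_⟩, Or.inr rfl⟩
      rintro ⟨_, hr⟩
      exact absurd (by
        rw [PySem.Set.contains_iff]
        exact hiff.mpr (reach_mono (fun q hq hf hb => hf ((hblc q hq).mp hb)) hr)) hv

-- ===== VERDICT (by name: the statement is the Claim_ definition above) =====
theorem solve_spec : Claim_equal_solve := by
  intro A B C D E F _hdom hpre
  unfold Spec_solve
  obtain ⟨ha1, ha2⟩ := solveA_char A B C D E F hpre
  obtain ⟨hb1, hb2⟩ := solveB_char A B C D E F hpre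
  by_cases h : ¬ BlkP C D E F (A, B) ∧
      Relation.ReflTransGen (StepRel A B (fun q => ¬ BlkP C D E F q)) (0, 0) (A, B)
  · rw [ha1.mpr h, hb1.mpr h]
  · have h2 : solve A B C D E F = "NO" := by
      rcases ha2 with h2 | h2
      · exact absurd (ha1.mp h2) h
      · exact h2
    have h3 : solve_alt A B C D E F = "NO" := by
      rcases hb2 with h3 | h3
      · exact absurd (hb1.mp h3) h
      · exact h3
    rw [h2, h3]
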